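-- pv_equiv track=rewrite | github.com/itisnotdone/mystudy | codility/flight_seat_reservation.py | solution
-- ===== SOURCE A (Python) =====
-- def solution(N, S):
--     cnt = 0
--     reserved_seats = set(S.split(' '))
--
--     all_seats = [[str(r) + alpha for alpha in list(str('ABCDEFGHJK'))] for r in range(1, N+1)]
--     # from pprint import pprint as pp
--     # pp(all_seats)
--     # print "{} have been reserved.".format(S)
--
--     for r in all_seats:
--     	if set(r[:3]).isdisjoint(reserved_seats):
--     		cnt += 1
--     	if set(r[3:6]).isdisjoint(reserved_seats) or set(r[4:7]).isdisjoint(reserved_seats):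
--     		cnt += 1
--     	if set(r[7:]).isdisjoint(reserved_seats):
--     		cnt += 1
--
--     return cnt
-- ===== SOURCE B (Python) =====
-- LETTERS = 'ABCDEFGHJK'
--
--
-- def solution(N, S):
--     # 3 families fit in every row with no reservation: answer = 3*N minus the
--     # deficit of each row that actually carries a reservation (O(|S|), not O(N)).
--     if N <= 0:
--         return 0
--     reserved = set(S.split(' '))
--     rows = set()
--     for t in reserved:
--         p = t[:-1]
--         if t and t[-1] in LETTERS and p.isdigit() and p[0] != '0':
--             v = 0
--             for ch in p:
--                 v = v * 10 + (ord(ch) - 48)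
--             if 0 < v <= N:
--                 rows.add(p)
--     deficit = 0
--     for p in rows:
--         blocked = 0
--         if p + 'A' in reserved or p + 'B' in reserved or p + 'C' in reserved:
--             blocked += 1
--         if (p + 'D' in reserved or p + 'E' in reserved or p + 'F' in reserved) and \
--            (p + 'E' in reserved or p + 'F' in reserved or p + 'G' in reserved):
--             blocked += 1
--         if p + 'H' in reserved or p + 'J' in reserved or p + 'K' in reserved:
--             blocked += 1
--         deficit += blocked
--     return 3 * N - deficit
-- ===== Notes on version B (the rewrite author's own statement) =====
-- stated objective: faster
-- what changed: B never enumerates the N rows: every free row seats 3 families, so B returns 3*N minus the deficit of each distinct reserved row, found by parsing the reservation tokens once (validate the digit row label, fold it to an int, test only those rows' seat blocks).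
import Mathlib
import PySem

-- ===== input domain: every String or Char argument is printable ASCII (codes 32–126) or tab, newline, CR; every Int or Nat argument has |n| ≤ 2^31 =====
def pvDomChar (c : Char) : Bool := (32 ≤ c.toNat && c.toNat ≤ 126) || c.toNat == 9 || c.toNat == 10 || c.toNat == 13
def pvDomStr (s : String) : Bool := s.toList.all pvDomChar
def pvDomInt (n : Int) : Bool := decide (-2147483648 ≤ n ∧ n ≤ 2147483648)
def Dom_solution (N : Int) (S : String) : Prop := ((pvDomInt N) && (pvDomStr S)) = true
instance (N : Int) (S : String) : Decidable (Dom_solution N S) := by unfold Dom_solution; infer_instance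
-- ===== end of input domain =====

-- B never enumerates the N rows: it returns 3*N minus the deficit of each distinct reserved row,
-- found by one pass over the reservation tokens (objective: faster, O(|S|) instead of O(N)).
-- Strings are modelled as List Char (str(r)+alpha = PySem.Int.toChars r ++ [alpha]).

-- ===== PORT A =====
-- row r of all_seats: [str(r) + alpha for alpha in list('ABCDEFGHJK')]

def pvRowA (r : Int) : List (List Char) :=
  ("ABCDEFGHJK".toList).map (fun alpha => PySem.Int.toChars r ++ [alpha])

-- the body of A's 'for r in all_seats' loop
def pvBodyA (reservedSeats : PySem.Set (List Char)) (cnt : Int) (r : List (List Char)) : Int :=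
  let cnt := if PySem.Set.isdisjoint (PySem.Set.ofList (PySem.List.slice r none (some 3))) reservedSeats then cnt + 1 else cnt
  let cnt := if PySem.Set.isdisjoint (PySem.Set.ofList (PySem.List.slice r (some 3) (some 6))) reservedSeats
                || PySem.Set.isdisjoint (PySem.Set.ofList (PySem.List.slice r (some 4) (some 7))) reservedSeats then cnt + 1 else cnt
  let cnt := if PySem.Set.isdisjoint (PySem.Set.ofList (PySem.List.slice r (some 7) none)) reservedSeats then cnt + 1 else cnt
  cnt

def solution (N : Int) (S : String) : Int :=
  ((PySem.List.pyRange 1 (N + 1) 1).map pvRowA).foldl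
    (pvBodyA (PySem.Set.ofList (PySem.Chars.splitOn S.toList [' ']))) 0

-- ===== PORT B =====
def pvLetters : List Char := "ABCDEFGHJK".toList

-- the digit fold 'v = 0; for ch in p: v = v*10 + (ord(ch) - 48)'
def pvVal (p : List Char) : Int := p.foldl (fun v c => v * 10 + ((c.toNat : Int) - 48)) 0

-- B's per-token test 't and t[-1] in LETTERS and p.isdigit() and p[0] != '0'' then '0 < v <= N',
-- with p = t[:-1] (p[0] is only read after isdigit guarantees p nonempty; headD '0' is that short-circuit)
def pvTokOk (N : Int) (t : List Char) : Bool :=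
  match t.getLast? with
  | none => false
  | some c =>
      pvLetters.contains c &&
      PySem.Chars.strIsdigit (PySem.List.slice t none (some (-1))) &&
      ((PySem.List.slice t none (some (-1))).headD '0' != '0') &&
      (decide (0 < pvVal (PySem.List.slice t none (some (-1)))) &&
       decide (pvVal (PySem.List.slice t none (some (-1))) ≤ N))

-- 'rows = set(); for t in reserved: if ...: rows.add(p)'
def pvRowsB (N : Int) (R : PySem.Set (List Char)) : PySem.Set (List Char) :=
  R.foldl (fun s t => if pvTokOk N t then PySem.Set.add s (PySem.List.slice t none (some (-1))) else s)
    PySem.Set.empty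

-- the per-row 'blocked' count of B's deficit loop
def pvBlocked (R : PySem.Set (List Char)) (p : List Char) : Int :=
  let b : Int := 0
  let b := if R.contains (p ++ ['A']) || R.contains (p ++ ['B']) || R.contains (p ++ ['C']) then b + 1 else b
  let b := if (R.contains (p ++ ['D']) || R.contains (p ++ ['E']) || R.contains (p ++ ['F'])) &&
              (R.contains (p ++ ['E']) || R.contains (p ++ ['F']) || R.contains (p ++ ['G'])) then b + 1 else b
  let b := if R.contains (p ++ ['H']) || R.contains (p ++ ['J']) || R.contains (p ++ ['K']) then b + 1 else b
  b

def solution_alt (N : Int) (S : String) : Int :=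
  if N ≤ 0 then 0
  else
    let R := PySem.Set.ofList (PySem.Chars.splitOn S.toList [' '])
    let rows := pvRowsB N R
    let deficit := rows.foldl (fun d p => d + pvBlocked R p) 0
    3 * N - deficit

-- ===== PRECONDITION & SPEC =====
def Spec_solution (N : Int) (S : String) (out : Int) : Prop := out = solution_alt N S
instance (N : Int) (S : String) (out : Int) : Decidable (Spec_solution N S out) := by unfold Spec_solution; infer_instance

-- ===== CLAIM =====
def Claim_equal_solution : Prop := ∀ (N : Int) (S : String), Dom_solution N S → Spec_solution N S (solution N S)

-- ===== LEMMAS AND PROOFS =====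

-- canonical decimal string: nonempty, all ASCII digits, no leading zero

def pvCanon (p : List Char) : Prop :=
  p ≠ [] ∧ (∀ c ∈ p, PySem.Chars.isdigit c = true) ∧ p.headD '0' ≠ '0'

theorem pv_toDigitsCore_acc (b f n : Nat) (l : List Char) :
    Nat.toDigitsCore b f n l = Nat.toDigitsCore b f n [] ++ l := by
  induction f generalizing n l with
  | zero => simp [Nat.toDigitsCore]
  | succ f ih =>
    simp only [Nat.toDigitsCore]
    by_cases h : n / b = 0
    · simp [h]
    · simp only [h]
      rw [ih (n / b) ((n % b).digitChar :: l), ih (n / b) [(n % b).digitChar]]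
      simp

theorem pv_toDigitsCore_fuel (n : Nat) : ∀ f : Nat, n < f →
    Nat.toDigitsCore 10 f n [] = Nat.toDigitsCore 10 (n + 1) n [] := by
  induction n using Nat.strong_induction_on with
  | _ n ih =>
    intro f hf
    match f, hf with
    | f + 1, hf =>
      simp only [Nat.toDigitsCore]
      by_cases h : n / 10 = 0
      · simp [h]
      · simp only [h, if_false]
        have hlt : n / 10 < n := Nat.div_lt_self (Nat.pos_of_ne_zero (by
          intro h0; subst h0; simp at h)) (by norm_num)
        rw [pv_toDigitsCore_acc 10 f (n / 10), pv_toDigitsCore_acc 10 n (n / 10),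
          ih (n / 10) hlt f (by omega), ih (n / 10) hlt n (by omega)]

theorem pv_toDigits10_lt (n : Nat) (h : n < 10) : Nat.toDigits 10 n = [Nat.digitChar n] := by
  simp only [Nat.toDigits, Nat.toDigitsCore]
  rw [Nat.div_eq_of_lt h, Nat.mod_eq_of_lt h]
  simp

theorem pv_toDigits10_ge (n : Nat) (h : 10 ≤ n) :
    Nat.toDigits 10 n = Nat.toDigits 10 (n / 10) ++ [Nat.digitChar (n % 10)] := by
  have h10 : n / 10 ≠ 0 := by
    intro h0
    have := Nat.div_eq_of_lt (show n < 10 by omega)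
    omega
  conv_lhs => rw [Nat.toDigits]
  simp only [Nat.toDigitsCore, h10, if_false]
  rw [pv_toDigitsCore_acc, Nat.toDigits,
    pv_toDigitsCore_fuel (n / 10) n (by omega)]

theorem pv_digitChar_toNat (k : Nat) (h : k < 10) : (Nat.digitChar k).toNat = 48 + k := by
  interval_cases k <;> rfl

theorem pv_digitChar_isdigit (k : Nat) (h : k < 10) : PySem.Chars.isdigit (Nat.digitChar k) = true := by
  interval_cases k <;> decide

theorem pv_isdigit_toNat (c : Char) (h : PySem.Chars.isdigit c = true) :
    48 ≤ c.toNat ∧ c.toNat ≤ 57 := by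
  simp only [PySem.Chars.isdigit, Bool.and_eq_true, decide_eq_true_eq] at h
  obtain ⟨h1, h2⟩ := h
  constructor
  · exact h1
  · exact h2

theorem pv_digitChar_of_isdigit (c : Char) (h : PySem.Chars.isdigit c = true) :
    Nat.digitChar (c.toNat - 48) = c := by
  obtain ⟨h1, h2⟩ := pv_isdigit_toNat c h
  have heq : (Nat.digitChar (c.toNat - 48)).toNat = c.toNat := by
    rw [pv_digitChar_toNat _ (by omega)]
    omega
  exact Char.ext (UInt32.toNat_inj.mp heq)

theorem pv_val_append (p : List Char) (c : Char) :
    pvVal (p ++ [c]) = pvVal p * 10 + ((c.toNat : Int) - 48) := by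
  simp [pvVal, List.foldl_append]

theorem pv_val_toDigits (n : Nat) : pvVal (Nat.toDigits 10 n) = (n : Int) := by
  induction n using Nat.strong_induction_on with
  | _ n ih =>
    by_cases h : n < 10
    · rw [pv_toDigits10_lt n h]
      have := pv_digitChar_toNat n h
      show pvVal ([] ++ [Nat.digitChar n]) = (n : Int)
      rw [pv_val_append]
      simp [pvVal, this]
    · rw [Nat.not_lt] at h
      rw [pv_toDigits10_ge n h, pv_val_append,
        ih (n / 10) (Nat.div_lt_self (by omega) (by norm_num)),
        pv_digitChar_toNat (n % 10) (Nat.mod_lt n (by norm_num))]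
      have := Nat.div_add_mod n 10
      push_cast
      omega

theorem pv_canon_toDigits (n : Nat) (h : 1 ≤ n) : pvCanon (Nat.toDigits 10 n) := by
  induction n using Nat.strong_induction_on with
  | _ n ih =>
    by_cases hlt : n < 10
    · rw [pv_toDigits10_lt n hlt]
      refine ⟨by simp, ?_, ?_⟩
      · intro c hc
        simp at hc
        rw [hc]
        exact pv_digitChar_isdigit n hlt
      · have := pv_digitChar_toNat n hlt
        simp only [List.headD_cons]
        intro hc
        rw [hc] at this
        simp at this
        omega
    · rw [Nat.not_lt] at hlt
      rw [pv_toDigits10_ge n hlt]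
      obtain ⟨hne, hdig, hhead⟩ := ih (n / 10) (Nat.div_lt_self (by omega) (by norm_num)) (by
        have : 1 ≤ n / 10 := (Nat.one_le_div_iff (by norm_num)).mpr hlt
        omega)
      refine ⟨by simp, ?_, ?_⟩
      · intro c hc
        rcases List.mem_append.mp hc with hc | hc
        · exact hdig c hc
        · simp at hc
          rw [hc]
          exact pv_digitChar_isdigit (n % 10) (Nat.mod_lt n (by norm_num))
      · rcases p' : Nat.toDigits 10 (n / 10) with _ | ⟨a, as⟩
        · exact absurd p' hne
        · rw [p'] at hhead
          simpa using hhead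

theorem pv_toDigits_val (p : List Char) (h : pvCanon p) :
    1 ≤ pvVal p ∧ Nat.toDigits 10 (pvVal p).toNat = p := by
  induction p using List.reverseRecOn with
  | nil => exact absurd rfl h.1
  | append_singleton q c ih =>
    obtain ⟨-, hdig, hhead⟩ := h
    have hc : PySem.Chars.isdigit c = true := hdig c (by simp)
    obtain ⟨hc1, hc2⟩ := pv_isdigit_toNat c hc
    by_cases hqe : q = []
    · subst hqe
      have hval : pvVal ([] ++ [c]) = (c.toNat : Int) - 48 := by
        rw [pv_val_append]; simp [pvVal]
      simp only [List.nil_append] at hval ⊢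
      have hne0 : c ≠ '0' := by simpa using hhead
      have h48 : c.toNat ≠ 48 := by
        intro h48
        exact hne0 (Char.ext (UInt32.toNat_inj.mp (h48.trans (by decide : (48 : Nat) = '0'.toNat))))
      constructor
      · omega
      · rw [pv_toDigits10_lt _ (by omega)]
        have hv : (pvVal [c]).toNat = c.toNat - 48 := by omega
        rw [hv, pv_digitChar_of_isdigit c hc]
    · have hqcanon : pvCanon q := by
        refine ⟨hqe, fun d hd => hdig d (by simp [hd]), ?_⟩
        rcases q with _ | ⟨a, as⟩
        · exact absurd rfl hqe
        · simpa using hhead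
      obtain ⟨hv1, hv2⟩ := ih hqcanon
      rw [pv_val_append]
      constructor
      · omega
      · have hbig : (10 : Nat) ≤ (pvVal q * 10 + ((c.toNat : Int) - 48)).toNat := by omega
        rw [pv_toDigits10_ge _ hbig]
        have hdiv : (pvVal q * 10 + ((c.toNat : Int) - 48)).toNat / 10 = (pvVal q).toNat := by omega
        have hmod : (pvVal q * 10 + ((c.toNat : Int) - 48)).toNat % 10 = c.toNat - 48 := by omega
        rw [hdiv, hmod, hv2, pv_digitChar_of_isdigit c hc]

theorem pv_toChars_nonneg (r : Int) (h : 0 ≤ r) :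
    PySem.Int.toChars r = Nat.toDigits 10 r.toNat := by
  simp [PySem.Int.toChars]
  intro hneg
  omega

theorem pv_val_toChars (r : Int) (h : 0 ≤ r) : pvVal (PySem.Int.toChars r) = r := by
  rw [pv_toChars_nonneg r h, pv_val_toDigits]
  omega

theorem pv_tokOk_iff (N : Int) (t : List Char) :
    pvTokOk N t = true ↔
      ∃ r : Int, 1 ≤ r ∧ r ≤ N ∧ ∃ c ∈ pvLetters, t = PySem.Int.toChars r ++ [c] := by
  constructor
  · intro h
    unfold pvTokOk at h
    rcases hg : t.getLast? with _ | c
    · rw [hg] at h; cases h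
    · rw [hg] at h
      simp only [PySem.List.slice_to_neg_one, Bool.and_eq_true, decide_eq_true_eq, bne_iff_ne] at h
      obtain ⟨⟨⟨hcL, hdig⟩, hhead⟩, hpos, hle⟩ := h
      have ht : t = t.dropLast ++ [c] := by
        rcases List.getLast?_eq_some_iff.mp hg with ⟨q, hq⟩
        rw [hq]; simp
      have hcanon : pvCanon t.dropLast := by
        simp only [PySem.Chars.strIsdigit, Bool.and_eq_true, List.all_eq_true, Bool.not_eq_true',
          List.isEmpty_eq_false_iff] at hdig
        exact ⟨hdig.1, fun d hd => hdig.2 d hd, hhead⟩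
      obtain ⟨hv1, hv2⟩ := pv_toDigits_val _ hcanon
      refine ⟨pvVal t.dropLast, hv1, hle, c, ?_, ?_⟩
      · simpa using hcL
      · rw [pv_toChars_nonneg _ (by omega)]
        conv_lhs => rw [ht]
        rw [hv2]
  · rintro ⟨r, hr1, hrN, c, hcmem, rfl⟩
    have hcanon := pv_canon_toDigits r.toNat (by omega)
    rw [← pv_toChars_nonneg r (by omega)] at hcanon
    obtain ⟨hne, hdig, hhead⟩ := hcanon
    unfold pvTokOk
    rw [List.getLast?_concat]
    simp only [PySem.List.slice_to_neg_one, List.dropLast_concat, Bool.and_eq_true,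
      decide_eq_true_eq, bne_iff_ne]
    refine ⟨⟨⟨by simpa using hcmem, ?_⟩, hhead⟩, ?_, ?_⟩
    · simp only [PySem.Chars.strIsdigit, Bool.and_eq_true, List.all_eq_true, Bool.not_eq_true',
        List.isEmpty_eq_false_iff]
      exact ⟨hne, fun d hd => hdig d hd⟩
    · rw [pv_val_toChars r (by omega)]; omega
    · rw [pv_val_toChars r (by omega)]; exact hrN

theorem pv_rows_fold_mem (N : Int) (l : List (List Char)) (acc : PySem.Set (List Char)) (p : List Char) :
    (p ∈ l.foldl (fun s t => if pvTokOk N t then PySem.Set.add s (PySem.List.slice t none (some (-1))) else s) acc) ↔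
      p ∈ acc ∨ ∃ t ∈ l, pvTokOk N t = true ∧ p = t.dropLast := by
  induction l generalizing acc with
  | nil => simp
  | cons t l ih =>
    rw [List.foldl_cons, ih]
    by_cases h : pvTokOk N t = true
    · simp only [h, if_true, PySem.List.slice_to_neg_one, PySem.Set.mem_add]
      constructor
      · rintro (⟨hp | hp⟩ | ⟨u, hu, hok, rfl⟩)
        · exact Or.inl hp
        · exact Or.inr ⟨t, by simp, h, hp⟩
        · exact Or.inr ⟨u, by simp [hu], hok, rfl⟩
      · rintro (hp | ⟨u, hu, hok, rfl⟩)
        · exact Or.inl (Or.inl hp)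
        · rcases List.mem_cons.mp hu with rfl | hu
          · exact Or.inl (Or.inr rfl)
          · exact Or.inr ⟨u, hu, hok, rfl⟩
    · simp only [h, if_false]
      constructor
      · rintro (hp | ⟨u, hu, hok, rfl⟩)
        · exact Or.inl hp
        · exact Or.inr ⟨u, by simp [hu], hok, rfl⟩
      · rintro (hp | ⟨u, hu, hok, rfl⟩)
        · exact Or.inl hp
        · rcases List.mem_cons.mp hu with rfl | hu
          · exact absurd hok h
          · exact Or.inr ⟨u, hu, hok, rfl⟩

theorem pv_mem_rowsB_iff (N : Int) (R : PySem.Set (List Char)) (p : List Char) :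
    p ∈ pvRowsB N R ↔
      ∃ r : Int, 1 ≤ r ∧ r ≤ N ∧ p = PySem.Int.toChars r ∧
        ∃ c ∈ pvLetters, PySem.Int.toChars r ++ [c] ∈ R := by
  unfold pvRowsB
  rw [pv_rows_fold_mem]
  simp only [PySem.Set.empty]
  constructor
  · rintro (hp | ⟨t, ht, hok, rfl⟩)
    · simp at hp
    · obtain ⟨r, hr1, hrN, c, hcmem, rfl⟩ := (pv_tokOk_iff N t).mp hok
      have hd : (PySem.Int.toChars r ++ [c]).dropLast = PySem.Int.toChars r := by simp
      exact ⟨r, hr1, hrN, hd, c, hcmem, ht⟩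
  · rintro ⟨r, hr1, hrN, rfl, c, hcmem, hmem⟩
    refine Or.inr ⟨PySem.Int.toChars r ++ [c], hmem, ?_, by simp⟩
    exact (pv_tokOk_iff N _).mpr ⟨r, hr1, hrN, c, hcmem, rfl⟩

theorem pv_rows_fold_nodup (N : Int) (l : List (List Char)) (acc : PySem.Set (List Char))
    (h : acc.Nodup) :
    (l.foldl (fun s t => if pvTokOk N t then PySem.Set.add s (PySem.List.slice t none (some (-1))) else s) acc).Nodup := by
  induction l generalizing acc with
  | nil => exact h
  | cons t l ih =>
    rw [List.foldl_cons]
    apply ih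
    by_cases hok : pvTokOk N t = true
    · simp only [hok, if_true]
      exact PySem.Set.nodup_add acc _ h
    · simpa [hok] using h

theorem pv_rowsB_nodup (N : Int) (R : PySem.Set (List Char)) : (pvRowsB N R).Nodup :=
  pv_rows_fold_nodup N R PySem.Set.empty List.nodup_nil

theorem pv_disj3 (a b c : List Char) (R : PySem.Set (List Char)) :
    PySem.Set.isdisjoint (PySem.Set.ofList [a, b, c]) R
      = (!(PySem.Set.contains R a) && !(PySem.Set.contains R b) && !(PySem.Set.contains R c)) := by
  have hmem : ∀ y : List Char, y ∈ PySem.Set.ofList [a, b, c] ↔ (y = a ∨ y = b ∨ y = c) := by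
    intro y
    rw [PySem.Set.mem_ofList]
    simp
  rw [Bool.eq_iff_iff, PySem.Set.isdisjoint_iff]
  constructor
  · intro h
    simp only [Bool.and_eq_true, Bool.not_eq_true']
    refine ⟨⟨?_, ?_⟩, ?_⟩ <;>
      · rw [Bool.eq_false_iff]
        intro hco
        exact h _ ((hmem _).mpr (by simp)) ((PySem.Set.contains_iff R _).mp hco)
  · intro h y hy hyR
    simp only [Bool.and_eq_true, Bool.not_eq_true'] at h
    rcases (hmem y).mp hy with rfl | rfl | rfl
    · rw [← PySem.Set.contains_iff R y, h.1.1] at hyR; cases hyR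
    · rw [← PySem.Set.contains_iff R y, h.1.2] at hyR; cases hyR
    · rw [← PySem.Set.contains_iff R y, h.2] at hyR; cases hyR

theorem pv_body_blocked (R : PySem.Set (List Char)) (acc : Int) (r : Int) :
    pvBodyA R acc (pvRowA r) = acc + (3 - pvBlocked R (PySem.Int.toChars r)) := by
  have hL : "ABCDEFGHJK".toList = ['A','B','C','D','E','F','G','H','J','K'] := rfl
  set p := PySem.Int.toChars r with hp
  have hrow : pvRowA r = [p ++ ['A'], p ++ ['B'], p ++ ['C'], p ++ ['D'], p ++ ['E'],
      p ++ ['F'], p ++ ['G'], p ++ ['H'], p ++ ['J'], p ++ ['K']] := by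
    rw [pvRowA, hL]; rfl
  have hs1 : PySem.List.slice (pvRowA r) none (some 3) = [p ++ ['A'], p ++ ['B'], p ++ ['C']] := by
    rw [hrow]; rfl
  have hs2 : PySem.List.slice (pvRowA r) (some 3) (some 6) = [p ++ ['D'], p ++ ['E'], p ++ ['F']] := by
    rw [hrow]; rfl
  have hs3 : PySem.List.slice (pvRowA r) (some 4) (some 7) = [p ++ ['E'], p ++ ['F'], p ++ ['G']] := by
    rw [hrow]; rfl
  have hs4 : PySem.List.slice (pvRowA r) (some 7) none = [p ++ ['H'], p ++ ['J'], p ++ ['K']] := by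
    rw [hrow]; rfl
  simp only [pvBodyA, pvBlocked, hs1, hs2, hs3, hs4, pv_disj3]
  generalize R.contains (p ++ ['A']) = xa
  generalize R.contains (p ++ ['B']) = xb
  generalize R.contains (p ++ ['C']) = xc
  generalize R.contains (p ++ ['D']) = xd
  generalize R.contains (p ++ ['E']) = xe
  generalize R.contains (p ++ ['F']) = xf
  generalize R.contains (p ++ ['G']) = xg
  generalize R.contains (p ++ ['H']) = xh
  generalize R.contains (p ++ ['J']) = xj
  generalize R.contains (p ++ ['K']) = xk
  cases xa <;> cases xb <;> cases xc <;> cases xd <;> cases xe <;> cases xf <;>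
    cases xg <;> cases xh <;> cases xj <;> cases xk <;> simp <;> omega

theorem pv_blocked_zero (N : Int) (R : PySem.Set (List Char)) (r : Int)
    (hr : 1 ≤ r) (hrN : r ≤ N) (h : PySem.Int.toChars r ∉ pvRowsB N R) :
    pvBlocked R (PySem.Int.toChars r) = 0 := by
  have hnone : ∀ c ∈ pvLetters, (PySem.Int.toChars r ++ [c]) ∉ R := by
    intro c hc hco
    exact h ((pv_mem_rowsB_iff N R _).mpr ⟨r, hr, hrN, rfl, c, hc, hco⟩)
  have hA := hnone 'A' (by decide); have hB := hnone 'B' (by decide)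
  have hC := hnone 'C' (by decide); have hD := hnone 'D' (by decide)
  have hE := hnone 'E' (by decide); have hF := hnone 'F' (by decide)
  have hG := hnone 'G' (by decide); have hH := hnone 'H' (by decide)
  have hJ := hnone 'J' (by decide); have hK := hnone 'K' (by decide)
  simp [pvBlocked, hA, hB, hC, hD, hE, hF, hG, hH, hJ, hK]

theorem pv_sum_filter (l : List Int) (q : Int → Bool) (g : Int → Int)
    (h : ∀ x ∈ l, q x = false → g x = 0) :
    (l.map g).sum = ((l.filter q).map g).sum := by
  induction l with
  | nil => rfl
  | cons x l ih =>
    have ih' := ih (fun y hy => h y (by simp [hy]))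
    by_cases hq : q x = true
    · rw [List.map_cons, List.sum_cons, List.filter_cons_of_pos hq, List.map_cons, List.sum_cons, ih']
    · rw [List.map_cons, List.sum_cons, List.filter_cons_of_neg (by simpa using hq),
        h x (by simp) (by simpa using hq), ih']
      omega

theorem pv_sum_three_sub (l : List Int) (g : Int → Int) :
    (l.map (fun r => 3 - g r)).sum = 3 * l.length - (l.map g).sum := by
  induction l with
  | nil => simp
  | cons x l ih =>
    simp only [List.map_cons, List.sum_cons, List.length_cons, ih]
    push_cast
    ring

theorem pv_main (N : Int) (S : String) : solution N S = solution_alt N S := by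
  by_cases hN : N ≤ 0
  · unfold solution solution_alt
    rw [PySem.List.pyRange_one_eq_nil (by omega)]
    simp [hN]
  · push_cast at hN
    have hN1 : 1 ≤ N := by omega
    unfold solution solution_alt
    rw [if_neg hN]
    set R : PySem.Set (List Char) := PySem.Set.ofList (PySem.Chars.splitOn S.toList [' ']) with hR
    set rows := pvRowsB N R with hrows
    -- A side: fold to a sum
    rw [List.foldl_map]
    rw [PySem.List.foldl_congr_mem _ _
      (fun acc r => acc + (3 - pvBlocked R (PySem.Int.toChars r))) 0
      (fun acc x _ => pv_body_blocked R acc x)]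
    rw [PySem.List.foldl_add, pv_sum_three_sub, PySem.List.length_pyRange_one]
    -- B side: fold to a sum
    dsimp only
    rw [PySem.List.foldl_add]
    -- the filtered range
    set q : Int → Bool := fun r => decide (PySem.Int.toChars r ∈ rows) with hq
    rw [pv_sum_filter (PySem.List.pyRange 1 (N + 1) 1) q _ (fun x hx hqx => by
      refine pv_blocked_zero N R x ?_ ?_ (by simpa [hq] using hqx) <;>
        · have := (PySem.List.mem_pyRange_one).mp hx
          omega)]
    -- identify the two sums via a permutation
    have hperm : rows.Perm (((PySem.List.pyRange 1 (N + 1) 1).filter q).map PySem.Int.toChars) := by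
      rw [List.perm_ext_iff_of_nodup (pv_rowsB_nodup N R) ?nd]
      case nd =>
        refine List.Nodup.map_on ?_ ((PySem.List.nodup_pyRange_one 1 (N + 1)).filter q)
        intro x hx y hy hxy
        have hx' := (PySem.List.mem_pyRange_one).mp (List.mem_of_mem_filter hx)
        have hy' := (PySem.List.mem_pyRange_one).mp (List.mem_of_mem_filter hy)
        have : pvVal (PySem.Int.toChars x) = pvVal (PySem.Int.toChars y) := by rw [hxy]
        rwa [pv_val_toChars x (by omega), pv_val_toChars y (by omega)] at this
      intro p
      constructor
      · intro hp
        obtain ⟨r, hr1, hrN, rfl, hc⟩ := (pv_mem_rowsB_iff N R p).mp hp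
        refine List.mem_map.mpr ⟨r, List.mem_filter.mpr ⟨?_, ?_⟩, rfl⟩
        · exact (PySem.List.mem_pyRange_one).mpr ⟨by omega, by omega⟩
        · simp only [hq, decide_eq_true_eq]
          exact hp
      · intro hp
        obtain ⟨r, hr, rfl⟩ := List.mem_map.mp hp
        have := (List.mem_filter.mp hr).2
        simpa [hq] using this
    have hsum : (rows.map (pvBlocked R)).sum
        = (((PySem.List.pyRange 1 (N + 1) 1).filter q).map
            (fun r => pvBlocked R (PySem.Int.toChars r))).sum := by
      rw [(hperm.map (pvBlocked R)).sum_eq, List.map_map]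
      rfl
    rw [hsum]
    omega

-- ===== VERDICT =====
theorem solution_spec : Claim_equal_solution := by
  intro N S _
  unfold Spec_solution
  exact pv_main N S
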